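-- pv_equiv track=rewrite | github.com/cirosantilli/project-euler-solutions | solvers/927.py | sum_squarefree_products_leq
-- ===== SOURCE A (Python) =====
-- def sum_squarefree_products_leq(limit: int, primes_list: list[int]) -> int:
--     """Sum of all squarefree products of a subset of primes_list that are <= limit."""
--     prods = [1]
--     for p in primes_list:
--         base_len = len(prods)
--         for i in range(base_len):
--             v = prods[i] * p
--             if v <= limit:
--                 prods.append(v)
--     return sum(prods)
-- ===== SOURCE B (Python) =====
-- def sum_squarefree_products_leq(limit: int, primes_list: list[int]) -> int:
--     """Sum of all squarefree products of a subset of primes_list that are <= limit."""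
--     def dfs(prod: int, i: int) -> int:
--         total = prod
--         for j in range(i, len(primes_list)):
--             v = prod * primes_list[j]
--             if v <= limit:
--                 total += dfs(v, j + 1)
--         return total
--     return dfs(1, 0)
-- ===== Notes on version B (the rewrite author's own statement) =====
-- stated objective: alternative
-- what changed: Replaces A's breadth-first growing list of products (append-while-iterating, then sum) by a depth-first recursion over the remaining primes that carries the current product and sums on the fly, using O(n) extra space instead of storing every product.
import Mathlib
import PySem

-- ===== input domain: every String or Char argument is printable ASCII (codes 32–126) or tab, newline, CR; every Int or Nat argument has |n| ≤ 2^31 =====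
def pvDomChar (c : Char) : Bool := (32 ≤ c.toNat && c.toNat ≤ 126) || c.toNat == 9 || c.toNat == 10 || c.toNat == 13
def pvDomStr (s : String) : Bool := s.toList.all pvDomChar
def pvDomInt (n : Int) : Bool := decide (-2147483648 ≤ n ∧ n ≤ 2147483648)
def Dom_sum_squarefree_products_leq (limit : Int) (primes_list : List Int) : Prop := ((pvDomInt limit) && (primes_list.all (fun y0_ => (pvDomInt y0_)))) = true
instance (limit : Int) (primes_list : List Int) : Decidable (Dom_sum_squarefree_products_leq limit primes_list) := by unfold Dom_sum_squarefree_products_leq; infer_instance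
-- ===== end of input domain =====

-- B replaces A's breadth-first growing product list by a depth-first recursion over the
-- remaining primes carrying the current product (objective: alternative, same cost).

-- ===== PORT A =====
-- A: prods = [1]; for p in primes_list: for i in range(len(prods)): v = prods[i]*p;
--    if v <= limit: prods.append(v); return sum(prods).
-- Index i is always in range (the inner loop only appends), so pyGetD is exact here.
def sum_squarefree_products_leq (limit : Int) (primes_list : List Int) : Int :=
  let prods := primes_list.foldl (fun prods p =>
    let base_len : Int := prods.length
    (PySem.List.pyRange 0 base_len 1).foldl (fun acc i =>
      let v := (PySem.List.pyGetD acc i 0) * p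
      if v ≤ limit then acc ++ [v] else acc) prods) [1]
  prods.sum

-- ===== PORT B =====
-- B (from Source B): dfs(prod, suffix) = prod + Σ over positions j in the suffix with
-- prod*primes[j] <= limit of dfs(prod*primes[j], suffix after j).
def pvDfsGo (limit : Int) : Int → List Int → Int
  | _, [] => 0
  | prod, p :: rest =>
      (if prod * p ≤ limit then (prod * p) + pvDfsGo limit (prod * p) rest else 0)
        + pvDfsGo limit prod rest

def pvDfs (limit prod : Int) (ps : List Int) : Int := prod + pvDfsGo limit prod ps

def sum_squarefree_products_leq_alt (limit : Int) (primes_list : List Int) : Int :=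
  pvDfs limit 1 primes_list

-- ===== PRECONDITION & SPEC =====
def Spec_sum_squarefree_products_leq (limit : Int) (primes_list : List Int) (out : Int) : Prop := out = sum_squarefree_products_leq_alt limit primes_list
instance (limit : Int) (primes_list : List Int) (out : Int) : Decidable (Spec_sum_squarefree_products_leq limit primes_list out) := by unfold Spec_sum_squarefree_products_leq; infer_instance

-- ===== CLAIM (what is proved, stated in full; the proofs are below) =====
def Claim_equal_sum_squarefree_products_leq : Prop := ∀ (limit : Int) (primes_list : List Int), Dom_sum_squarefree_products_leq limit primes_list → Spec_sum_squarefree_products_leq limit primes_list (sum_squarefree_products_leq limit primes_list)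

-- ===== LEMMAS AND PROOFS =====

-- A's inner loop, generalized: starting from base ++ extra and scanning indices a..base.length
-- of the growing accumulator (which always has base as a prefix), it appends exactly the
-- filtered products of the unscanned part of base.
theorem pvInner_aux (limit p : Int) (base : List Int) : ∀ (a : Nat) (extra : List Int), a ≤ base.length →
    (PySem.List.pyRange (a : Int) (base.length : Int) 1).foldl (fun acc i =>
      let v := (PySem.List.pyGetD acc i 0) * p
      if v ≤ limit then acc ++ [v] else acc) (base ++ extra)
    = base ++ extra ++ ((base.drop a).map (· * p)).filter (· ≤ limit) := by
  intro a
  induction hn : base.length - a using Nat.strong_induction_on generalizing a with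
  | _ n ih =>
    intro extra ha
    rcases Nat.eq_or_lt_of_le ha with heq | hlt
    · rw [heq, PySem.List.pyRange_one_eq_nil (le_refl _), List.foldl_nil, List.drop_length]
      simp
    · have hcast : (a : Int) < (base.length : Int) := by exact_mod_cast hlt
      rw [PySem.List.pyRange_one_cons hcast, List.foldl_cons]
      have hget : PySem.List.pyGetD (base ++ extra) (a : Int) 0 = base[a] := by
        rw [PySem.List.pyGetD_natCast]
        rw [List.getD_eq_getElem?_getD, List.getElem?_append_left hlt,
          List.getElem?_eq_getElem hlt, Option.getD_some]
      have hrange : ((a : Int) + 1) = ((a + 1 : Nat) : Int) := by push_cast; ring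
      have hdrop : base.drop a = base[a] :: base.drop (a + 1) :=
        (List.drop_eq_getElem_cons hlt).symm ▸ rfl
      by_cases hv : base[a] * p ≤ limit
      · rw [show (let v := PySem.List.pyGetD (base ++ extra) (a : Int) 0 * p;
              if v ≤ limit then base ++ extra ++ [v] else base ++ extra)
            = base ++ (extra ++ [base[a] * p]) by simp [hget, hv]]
        rw [hrange, ih (base.length - (a + 1)) (by omega) (a + 1) rfl (extra ++ [base[a] * p]) (by omega)]
        rw [hdrop]
        simp only [List.map_cons, List.filter_cons]
        simp [hv]
      · rw [show (let v := PySem.List.pyGetD (base ++ extra) (a : Int) 0 * p;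
              if v ≤ limit then base ++ extra ++ [v] else base ++ extra)
            = base ++ extra by simp [hget, hv]]
        rw [hrange, ih (base.length - (a + 1)) (by omega) (a + 1) rfl extra (by omega)]
        rw [hdrop]
        simp only [List.map_cons, List.filter_cons]
        simp [hv]

theorem pvInner (limit p : Int) (base : List Int) :
    (PySem.List.pyRange 0 (base.length : Int) 1).foldl (fun acc i =>
      let v := (PySem.List.pyGetD acc i 0) * p
      if v ≤ limit then acc ++ [v] else acc) base
    = base ++ (base.map (· * p)).filter (· ≤ limit) := by
  have h := pvInner_aux limit p base 0 [] (Nat.zero_le _)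
  simpa using h

theorem pvDfs_cons (limit prod p : Int) (rest : List Int) :
    pvDfs limit prod (p :: rest)
    = (if prod * p ≤ limit then pvDfs limit (prod * p) rest else 0) + pvDfs limit prod rest := by
  simp [pvDfs, pvDfsGo]; ring

theorem pvSum_filter_map (limit p : Int) (l : List Int) (g : Int → Int) :
    (((l.map (· * p)).filter (· ≤ limit)).map g).sum
    = (l.map (fun x => if x * p ≤ limit then g (x * p) else 0)).sum := by
  induction l with
  | nil => simp
  | cons x xs ih => by_cases h : x * p ≤ limit <;> simp [h, ih]

-- main invariant: the sum of the final list equals the sum of dfs over the current products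
theorem pvMain (limit : Int) (ps : List Int) : ∀ (prods : List Int),
    (ps.foldl (fun prods p =>
      let base_len : Int := prods.length
      (PySem.List.pyRange 0 base_len 1).foldl (fun acc i =>
        let v := (PySem.List.pyGetD acc i 0) * p
        if v ≤ limit then acc ++ [v] else acc) prods) prods).sum
    = (prods.map (fun x => pvDfs limit x ps)).sum := by
  induction ps with
  | nil => intro prods; simp [pvDfs, pvDfsGo]
  | cons p ps ih =>
      intro prods
      rw [List.foldl_cons]
      simp only [pvInner limit p prods]
      rw [ih]
      simp only [List.map_append, List.sum_append, pvSum_filter_map]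
      simp only [pvDfs_cons]
      rw [← PySem.List.sum_map_add_int]
      congr 1
      apply List.map_congr_left
      intro x _
      ring

-- ===== VERDICT (by name: the statement is the Claim_ definition above) =====
theorem sum_squarefree_products_leq_spec : Claim_equal_sum_squarefree_products_leq := by
  intro limit primes_list _
  unfold Spec_sum_squarefree_products_leq sum_squarefree_products_leq sum_squarefree_products_leq_alt
  have h := pvMain limit primes_list [1]
  simpa using h
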